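-- pv_equiv track=rewrite | github.com/domgan/cotc-tactician | scripts/import_adversary_log_from_csv.py | format_weaknesses_yaml
-- ===== SOURCE A (Python) =====
-- def format_weaknesses_yaml(weaknesses: list[str], indent: int = 0) -> list[str]:
--     """Format weaknesses as YAML lines."""
--     lines = []
--     prefix = "  " * indent
--
--     elements = [w for w in weaknesses if w in ['fire', 'ice', 'lightning', 'wind', 'light', 'dark']]
--     weapons = [w for w in weaknesses if w in ['sword', 'polearm', 'dagger', 'axe', 'bow', 'staff', 'tome', 'fan']]
--
--     if elements or weapons:
--         lines.append(f"{prefix}weaknesses:")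
--         if elements:
--             lines.append(f"{prefix}  elements:")
--             for e in elements:
--                 lines.append(f"{prefix}    - {e}")
--         if weapons:
--             lines.append(f"{prefix}  weapons:")
--             for w in weapons:
--                 lines.append(f"{prefix}    - {w}")
--
--     return lines
-- ===== SOURCE B (Python) =====
-- _CATEGORY = {
--     'fire': 0, 'ice': 0, 'lightning': 0, 'wind': 0, 'light': 0, 'dark': 0,
--     'sword': 1, 'polearm': 1, 'dagger': 1, 'axe': 1, 'bow': 1, 'staff': 1,
--     'tome': 1, 'fan': 1,
-- }
-- _LABEL = ['elements', 'weapons']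
--
--
-- def format_weaknesses_yaml(weaknesses: list[str], indent: int = 0) -> list[str]:
--     """Format weaknesses as YAML lines."""
--     prefix = "  " * indent
--     # tag each known weakness with its category index and stably sort by it:
--     # stability keeps the per-category input order, the sort puts elements first
--     tagged = sorted(((_CATEGORY[w], w) for w in weaknesses if w in _CATEGORY),
--                     key=lambda t: t[0])
--     lines = []
--     current = None  # category of the group being emitted
--     for cat, w in tagged:
--         if current is None:
--             lines.append(prefix + "weaknesses:")
--         if cat != current:
--             lines.append(prefix + "  " + _LABEL[cat] + ":")
--             current = cat
--         lines.append(prefix + "    - " + w)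
--     return lines
-- ===== Notes on version B (the rewrite author's own statement) =====
-- stated objective: alternative
-- what changed: Instead of A's two per-category filter passes each followed by a hardcoded format block, B tags each known weakness with a category index via one dict lookup, stably sorts the tagged list by that index, and emits all lines in a single group-change scan with lazy headers.
import Mathlib
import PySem

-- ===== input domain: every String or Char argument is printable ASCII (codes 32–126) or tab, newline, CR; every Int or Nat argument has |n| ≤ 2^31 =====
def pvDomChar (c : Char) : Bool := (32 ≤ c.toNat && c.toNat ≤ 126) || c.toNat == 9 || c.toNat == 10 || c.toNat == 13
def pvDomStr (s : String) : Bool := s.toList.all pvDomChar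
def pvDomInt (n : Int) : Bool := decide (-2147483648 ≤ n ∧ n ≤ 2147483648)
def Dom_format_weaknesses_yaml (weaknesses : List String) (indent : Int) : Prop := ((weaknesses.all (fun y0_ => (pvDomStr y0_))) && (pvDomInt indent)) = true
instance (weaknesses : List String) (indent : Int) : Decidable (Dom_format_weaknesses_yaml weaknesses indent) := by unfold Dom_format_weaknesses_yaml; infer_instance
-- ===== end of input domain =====

-- B replaces A's two per-category filter-and-format blocks by tagging each known
-- weakness with a category index, stably sorting by it, and emitting headers lazily
-- in one group-change scan over the sorted list (objective: alternative).

-- shared helper: Python '"  " * indent' (exact: Python returns "" for indent ≤ 0, as does toNat's clamp)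
def pyStrRepeat (s : String) (n : Int) : String := String.join (List.replicate n.toNat s)

-- ===== PORT A =====
def pvElems : List String := ["fire", "ice", "lightning", "wind", "light", "dark"]
def pvWeaps : List String := ["sword", "polearm", "dagger", "axe", "bow", "staff", "tome", "fan"]

def format_weaknesses_yaml (weaknesses : List String) (indent : Int) : List String :=
  let prefix_ := pyStrRepeat "  " indent
  let elements := weaknesses.filter (fun w => pvElems.contains w)
  let weapons := weaknesses.filter (fun w => pvWeaps.contains w)
  if elements ≠ [] ∨ weapons ≠ [] then
    [prefix_ ++ "weaknesses:"]
      ++ (if elements ≠ [] then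
            (prefix_ ++ "  elements:") :: elements.map (fun e => prefix_ ++ "    - " ++ e)
          else [])
      ++ (if weapons ≠ [] then
            (prefix_ ++ "  weapons:") :: weapons.map (fun w => prefix_ ++ "    - " ++ w)
          else [])
  else []

-- ===== PORT B =====
-- the dict _CATEGORY: tag -> category index
def pvCatDict : PySem.Dict String Int := PySem.Dict.mk
  [("fire", 0), ("ice", 0), ("lightning", 0), ("wind", 0), ("light", 0), ("dark", 0),
   ("sword", 1), ("polearm", 1), ("dagger", 1), ("axe", 1), ("bow", 1), ("staff", 1),
   ("tome", 1), ("fan", 1)]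
-- the list _LABEL
def pvLabels : List String := ["elements", "weapons"]

-- one step of B's scan loop: state = (lines so far, current = category being emitted)
def pvScanStep (pfx : String) (st : List String × Option Int) (tw : Int × String) :
    List String × Option Int :=
  let lines1 := if st.2 = none then st.1 ++ [pfx ++ "weaknesses:"] else st.1
  let lines2 :=
    if some tw.1 ≠ st.2 then
      lines1 ++ [pfx ++ "  " ++ PySem.List.pyGetD pvLabels tw.1 "" ++ ":"]
    else lines1
  (lines2 ++ [pfx ++ "    - " ++ tw.2], some tw.1)

def format_weaknesses_yaml_alt (weaknesses : List String) (indent : Int) : List String :=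
  let prefix_ := pyStrRepeat "  " indent
  let tagged := PySem.List.sorted
    (weaknesses.filterMap (fun w => (PySem.Dict.get? pvCatDict w).map (fun c => (c, w))))
    (fun t => t.1) false
  (tagged.foldl (pvScanStep prefix_) ([], none)).1

-- ===== PRECONDITION & SPEC =====
def Spec_format_weaknesses_yaml (weaknesses : List String) (indent : Int) (out : List String) : Prop := out = format_weaknesses_yaml_alt weaknesses indent
instance (weaknesses : List String) (indent : Int) (out : List String) : Decidable (Spec_format_weaknesses_yaml weaknesses indent out) := by unfold Spec_format_weaknesses_yaml; infer_instance

-- ===== CLAIM (what is proved, stated in full; the proofs are below) =====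
def Claim_equal_format_weaknesses_yaml : Prop := ∀ (weaknesses : List String) (indent : Int), Dom_format_weaknesses_yaml weaknesses indent → Spec_format_weaknesses_yaml weaknesses indent (format_weaknesses_yaml weaknesses indent)

-- ===== LEMMAS AND PROOFS =====

-- category lookup, characterised against A's two literal tag lists
theorem pv_cat_elem (w : String) (h : pvElems.contains w = true) :
    PySem.Dict.get? pvCatDict w = some 0 := by
  simp [pvElems] at h
  rcases h with h | h | h | h | h | h <;> subst h <;> decide

theorem pv_cat_weap (w : String) (h : pvWeaps.contains w = true) :
    PySem.Dict.get? pvCatDict w = some 1 := by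
  simp [pvWeaps] at h
  rcases h with h | h | h | h | h | h | h | h <;> subst h <;> decide

theorem pv_cat_none (w : String) (he : pvElems.contains w = false)
    (hw : pvWeaps.contains w = false) : PySem.Dict.get? pvCatDict w = none := by
  simp [pvElems] at he
  simp [pvWeaps] at hw
  obtain ⟨e1, e2, e3, e4, e5, e6⟩ := he
  obtain ⟨w1, w2, w3, w4, w5, w6, w7, w8⟩ := hw
  have b1 : ("fire" == w) = false := beq_eq_false_iff_ne.mpr (fun h => e1 h.symm)
  have b2 : ("ice" == w) = false := beq_eq_false_iff_ne.mpr (fun h => e2 h.symm)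
  have b3 : ("lightning" == w) = false := beq_eq_false_iff_ne.mpr (fun h => e3 h.symm)
  have b4 : ("wind" == w) = false := beq_eq_false_iff_ne.mpr (fun h => e4 h.symm)
  have b5 : ("light" == w) = false := beq_eq_false_iff_ne.mpr (fun h => e5 h.symm)
  have b6 : ("dark" == w) = false := beq_eq_false_iff_ne.mpr (fun h => e6 h.symm)
  have b7 : ("sword" == w) = false := beq_eq_false_iff_ne.mpr (fun h => w1 h.symm)
  have b8 : ("polearm" == w) = false := beq_eq_false_iff_ne.mpr (fun h => w2 h.symm)
  have b9 : ("dagger" == w) = false := beq_eq_false_iff_ne.mpr (fun h => w3 h.symm)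
  have b10 : ("axe" == w) = false := beq_eq_false_iff_ne.mpr (fun h => w4 h.symm)
  have b11 : ("bow" == w) = false := beq_eq_false_iff_ne.mpr (fun h => w5 h.symm)
  have b12 : ("staff" == w) = false := beq_eq_false_iff_ne.mpr (fun h => w6 h.symm)
  have b13 : ("tome" == w) = false := beq_eq_false_iff_ne.mpr (fun h => w7 h.symm)
  have b14 : ("fan" == w) = false := beq_eq_false_iff_ne.mpr (fun h => w8 h.symm)
  simp [PySem.Dict.get?, pvCatDict, List.find?, b1, b2, b3, b4, b5, b6, b7, b8,
    b9, b10, b11, b12, b13, b14]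

-- B's classification pass, projected to each category, is A's corresponding filter
theorem pv_classify (weaknesses : List String) :
    (weaknesses.filterMap
        (fun w => (PySem.Dict.get? pvCatDict w).map (fun c => (c, w)))).filter
        (fun p => p.1 == (0 : Int))
      = (weaknesses.filter (fun w => pvElems.contains w)).map (fun w => ((0 : Int), w))
    ∧ (weaknesses.filterMap
        (fun w => (PySem.Dict.get? pvCatDict w).map (fun c => (c, w)))).filter
        (fun p => p.1 == (1 : Int))
      = (weaknesses.filter (fun w => pvWeaps.contains w)).map (fun w => ((1 : Int), w))
    ∧ ∀ p ∈ weaknesses.filterMap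
        (fun w => (PySem.Dict.get? pvCatDict w).map (fun c => (c, w))),
        p.1 = 0 ∨ p.1 = 1 := by
  induction weaknesses with
  | nil => exact ⟨rfl, rfl, by simp⟩
  | cons w ws ih =>
    obtain ⟨ih0, ih1, ihm⟩ := ih
    by_cases he : pvElems.contains w = true
    · have hw : pvWeaps.contains w = false := by
        simp [pvElems] at he
        rcases he with h | h | h | h | h | h <;> subst h <;> decide
      have hm : w ∈ pvElems := by simpa using he
      have hnm : w ∉ pvWeaps := by simpa using hw
      refine ⟨?_, ?_, ?_⟩
      · simp [pv_cat_elem w he, hm, ih0]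
      · simp [pv_cat_elem w he, hnm, ih1]
      · simp only [List.filterMap_cons, pv_cat_elem w he, Option.map_some]
        intro p hp
        rcases List.mem_cons.1 hp with h | h
        · subst h; exact Or.inl rfl
        · exact ihm p h
    · have he' : pvElems.contains w = false := by simpa using he
      have hnm : w ∉ pvElems := by simpa using he'
      by_cases hw : pvWeaps.contains w = true
      · have hm : w ∈ pvWeaps := by simpa using hw
        refine ⟨?_, ?_, ?_⟩
        · simp [pv_cat_weap w hw, hnm, ih0]
        · simp [pv_cat_weap w hw, hm, ih1]
        · simp only [List.filterMap_cons, pv_cat_weap w hw, Option.map_some]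
          intro p hp
          rcases List.mem_cons.1 hp with h | h
          · subst h; exact Or.inr rfl
          · exact ihm p h
      · have hw' : pvWeaps.contains w = false := by simpa using hw
        have hnw : w ∉ pvWeaps := by simpa using hw'
        refine ⟨?_, ?_, ?_⟩
        · simp [pv_cat_none w he' hw', hnm, ih0]
        · simp [pv_cat_none w he' hw', hnw, ih1]
        · simp only [List.filterMap_cons, pv_cat_none w he' hw']
          exact ihm

-- inserting past a block of elements none of which the new item goes before
theorem pv_insert_skip {α : Type} (before : α → α → Bool) (x : α) (a b : List α)
    (h : ∀ y ∈ a, before x y = false) :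
    PySem.List.insertBy before x (a ++ b) = a ++ PySem.List.insertBy before x b := by
  induction a with
  | nil => simp
  | cons y t ih =>
    simp only [List.cons_append, PySem.List.insertBy, h y (by simp)]
    simp only [Bool.false_eq_true, if_false, List.cons.injEq, true_and]
    exact ih (fun z hz => h z (by simp [hz]))

-- the insertion-sort fold on 0/1-keyed pairs keeps two stable blocks
theorem pv_sort01_aux (xs : List (Int × String)) :
    ∀ a0 a1 : List (Int × String), (∀ p ∈ xs, p.1 = 0 ∨ p.1 = 1) →
    (∀ p ∈ a0, p.1 = 0) → (∀ p ∈ a1, p.1 = 1) →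
    xs.foldl (fun acc x =>
        PySem.List.insertBy (fun a b => decide (a.1 < b.1)) x acc) (a0 ++ a1)
      = (a0 ++ xs.filter (fun p => p.1 == (0 : Int)))
        ++ (a1 ++ xs.filter (fun p => p.1 == (1 : Int))) := by
  induction xs with
  | nil => intro a0 a1 _ _ _; simp
  | cons x t ih =>
    intro a0 a1 hx h0 h1
    have hxm := hx x (by simp)
    rcases hxm with hx0 | hx1
    · have hstep : PySem.List.insertBy (fun a b => decide (a.1 < b.1)) x (a0 ++ a1)
          = (a0 ++ [x]) ++ a1 := by
        rw [pv_insert_skip _ x a0 a1 (fun y hy => by simp [hx0, h0 y hy])]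
        cases a1 with
        | nil => simp [PySem.List.insertBy]
        | cons b bt =>
          have hb : (decide (x.1 < b.1)) = true := by
            simp [hx0, h1 b (by simp)]
          simp [PySem.List.insertBy, hb]
      rw [List.foldl_cons, hstep,
        ih (a0 ++ [x]) a1 (fun p hp => hx p (by simp [hp]))
          (by intro p hp; rcases List.mem_append.1 hp with h | h
              · exact h0 p h
              · simp at h; subst h; exact hx0) h1]
      simp [hx0]
    · have hstep : PySem.List.insertBy (fun a b => decide (a.1 < b.1)) x (a0 ++ a1)
          = a0 ++ (a1 ++ [x]) := by
        rw [PySem.List.insertBy_of_forall_not_before _ x (a0 ++ a1)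
          (by intro y hy
              rcases List.mem_append.1 hy with h | h
              · simp [hx1, h0 y h]
              · simp [hx1, h1 y h])]
        simp
      rw [List.foldl_cons, hstep,
        ih a0 (a1 ++ [x]) (fun p hp => hx p (by simp [hp])) h0
          (by intro p hp; rcases List.mem_append.1 hp with h | h
              · exact h1 p h
              · simp at h; subst h; exact hx1)]
      simp [hx1]

-- B's stable sort by a 0/1 key is the two filters concatenated
theorem pv_sort01 (xs : List (Int × String)) (h : ∀ p ∈ xs, p.1 = 0 ∨ p.1 = 1) :
    PySem.List.sorted xs (fun t => t.1) false
      = xs.filter (fun p => p.1 == (0 : Int)) ++ xs.filter (fun p => p.1 == (1 : Int)) := by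
  rw [PySem.List.sorted_eq_foldl_insertBy]
  have := pv_sort01_aux xs [] [] h (by simp) (by simp)
  simpa using this

-- B's scan over a run of items in the current category only appends item lines
theorem pv_scan_const (p : String) (c : Int) (ys : List String) :
    ∀ lines : List String,
    (ys.map (fun s => (c, s))).foldl (pvScanStep p) (lines, some c)
      = (lines ++ ys.map (fun s => p ++ "    - " ++ s), some c) := by
  induction ys with
  | nil => intro lines; simp
  | cons y t ih =>
    intro lines
    simp only [List.map_cons, List.foldl_cons, pvScanStep]
    simp [ih]

-- B's label lookups reduce to the two literal labels
theorem pv_lab0 : PySem.List.pyGetD pvLabels 0 "" = "elements" := by decide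
theorem pv_lab1 : PySem.List.pyGetD pvLabels 1 "" = "weapons" := by decide

-- string-literal association for the generically built header lines
theorem pv_hdr (p l s : String) (h : "  " ++ (l ++ ":") = s) :
    p ++ "  " ++ l ++ ":" = p ++ s := by
  rw [String.append_assoc, String.append_assoc, h]

-- ===== VERDICT (by name: the statement is the Claim_ definition above) =====
theorem format_weaknesses_yaml_spec : Claim_equal_format_weaknesses_yaml := by
  intro weaknesses indent _
  show format_weaknesses_yaml weaknesses indent = format_weaknesses_yaml_alt weaknesses indent
  simp only [format_weaknesses_yaml, format_weaknesses_yaml_alt]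
  obtain ⟨h0, h1, hm⟩ := pv_classify weaknesses
  rw [pv_sort01 _ hm, h0, h1]
  set p := pyStrRepeat "  " indent
  set e := weaknesses.filter (fun w => pvElems.contains w) with he
  set w := weaknesses.filter (fun w => pvWeaps.contains w) with hw
  cases e with
  | nil =>
    cases w with
    | nil => simp
    | cons b bt =>
      simp only [List.map_nil, List.nil_append, List.map_cons, List.foldl_cons, pvScanStep]
      simp [pv_scan_const, pv_lab1, pv_hdr p "weapons" "  weapons:" (by decide)]
  | cons a at_ =>
    cases w with
    | nil =>
      simp only [List.map_cons, List.map_nil, List.append_nil, List.foldl_cons, pvScanStep]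
      simp [pv_scan_const, pv_lab0, pv_hdr p "elements" "  elements:" (by decide)]
    | cons b bt =>
      simp only [List.map_cons, List.cons_append, List.foldl_cons, pvScanStep]
      rw [show ((at_.map (fun s => ((0:Int), s)) ++ ((1:Int), b) :: bt.map (fun s => ((1:Int), s)))) = (at_.map (fun s => ((0:Int), s)) ++ (((1:Int), b) :: bt.map (fun s => ((1:Int), s)))) from rfl]
      rw [List.foldl_append]
      simp only [pv_scan_const]
      simp only [List.foldl_cons, pvScanStep]
      simp [pv_scan_const, pv_lab0, pv_lab1, pv_hdr p "elements" "  elements:" (by decide),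
        pv_hdr p "weapons" "  weapons:" (by decide)]
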